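-- pv_equiv track=rewrite | github.com/pypi-data/pypi-mirror-126 | packages/hifive-filler/hifive_filler-0.2.15-py3-none-any.whl/hifive_filler/parse.py | parse_field_line
-- ===== SOURCE A (Python) =====
-- def parse_field_line(line, row_index):
-- 	col_index = 0
-- 	player_one = []
-- 	player_two = []
-- 	token = []
-- 	while col_index < len(line):
-- 		## Python has no siwtch statements until 3.10
-- 		if line[col_index] == ".":
-- 			pass
-- 		elif line[col_index] == "*":
-- 			token.append((row_index, col_index))
-- 		elif line[col_index] == "O":
-- 			player_one.append((row_index, col_index))
-- 		elif line[col_index] == "o":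
-- 			player_one.append((row_index, col_index))
-- 		elif line[col_index] == "X":
-- 			player_two.append((row_index, col_index))
-- 		elif line[col_index] == "x":
-- 			player_two.append((row_index, col_index))
-- 		else:
-- 			raise Exception('Cell contains invalid character')
-- 		col_index += 1
-- 	return ((token, player_one, player_two))
-- ===== SOURCE B (Python) =====
-- def parse_field_line(line, row_index):
-- 	if any(c not in ".*OoXx" for c in line):
-- 		raise Exception('Cell contains invalid character')
-- 	token = [(row_index, i) for i, c in enumerate(line) if c == "*"]
-- 	player_one = [(row_index, i) for i, c in enumerate(line) if c in "Oo"]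
-- 	player_two = [(row_index, i) for i, c in enumerate(line) if c in "Xx"]
-- 	return ((token, player_one, player_two))
-- ===== Notes on version B (the rewrite author's own statement) =====
-- stated objective: idiomatic
-- what changed: Replaced the single interleaved index-while loop with mutable accumulators by an up-front validation pass plus three independent filtering comprehensions over enumerate(line).
import Mathlib
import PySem

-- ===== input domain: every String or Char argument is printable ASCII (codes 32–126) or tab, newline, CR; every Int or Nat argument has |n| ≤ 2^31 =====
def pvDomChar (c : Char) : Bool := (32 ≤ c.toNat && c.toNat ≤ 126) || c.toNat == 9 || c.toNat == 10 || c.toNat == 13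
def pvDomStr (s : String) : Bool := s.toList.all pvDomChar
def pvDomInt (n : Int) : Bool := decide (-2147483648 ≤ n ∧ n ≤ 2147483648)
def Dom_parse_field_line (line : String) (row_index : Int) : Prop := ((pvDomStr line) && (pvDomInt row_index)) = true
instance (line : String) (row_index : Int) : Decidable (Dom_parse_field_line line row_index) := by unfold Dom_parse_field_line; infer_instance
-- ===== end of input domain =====

-- B replaces A's single interleaved while-loop with validation plus three independent
-- filtering comprehensions (objective: idiomatic; equivalence of RETURN values on valid lines).

-- ===== PORT A =====
-- the while loop of A: index, the three accumulator lists; the final else branch raises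
-- (excluded by Pre_), here it stops returning the current state.
def pvLoopA (r : Int) : List Char → Int → List (Int × Int) → List (Int × Int) → List (Int × Int) →
    (List (Int × Int)) × (List (Int × Int)) × (List (Int × Int))
  | [], _, tok, p1, p2 => (tok, p1, p2)
  | c :: rest, i, tok, p1, p2 =>
    if c = '.' then pvLoopA r rest (i+1) tok p1 p2
    else if c = '*' then pvLoopA r rest (i+1) (tok ++ [(r, i)]) p1 p2
    else if c = 'O' then pvLoopA r rest (i+1) tok (p1 ++ [(r, i)]) p2
    else if c = 'o' then pvLoopA r rest (i+1) tok (p1 ++ [(r, i)]) p2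
    else if c = 'X' then pvLoopA r rest (i+1) tok p1 (p2 ++ [(r, i)])
    else if c = 'x' then pvLoopA r rest (i+1) tok p1 (p2 ++ [(r, i)])
    else (tok, p1, p2)  -- raise Exception('Cell contains invalid character'); outside Pre_

def parse_field_line (line : String) (row_index : Int) : (List (Int × Int)) × (List (Int × Int)) × (List (Int × Int)) :=
  pvLoopA row_index line.toList 0 [] [] []

-- ===== PORT B =====
def parse_field_line_alt (line : String) (row_index : Int) : (List (Int × Int)) × (List (Int × Int)) × (List (Int × Int)) :=
  if line.toList.any (fun c => ¬ (c ∈ ".*OoXx".toList)) then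
    ([], [], [])  -- raise Exception('Cell contains invalid character'); outside Pre_
  else
    let e := PySem.List.enumerate line.toList 0
    let token := e.filterMap (fun p => if p.2 = '*' then some (row_index, p.1) else none)
    let player_one := e.filterMap (fun p => if p.2 ∈ "Oo".toList then some (row_index, p.1) else none)
    let player_two := e.filterMap (fun p => if p.2 ∈ "Xx".toList then some (row_index, p.1) else none)
    (token, player_one, player_two)

-- ===== PRECONDITION & SPEC =====
-- Pre_ excludes exactly the lines containing a character outside ".*OoXx", on which A raises
-- Exception('Cell contains invalid character') (B raises the same).
def Pre_parse_field_line (line : String) (row_index : Int) : Prop :=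
  line.toList.all (fun c => c ∈ ['.', '*', 'O', 'o', 'X', 'x']) = true
instance (line : String) (row_index : Int) : Decidable (Pre_parse_field_line line row_index) := by
  unfold Pre_parse_field_line; infer_instance
def pvWitness_parse_field_line : String × Int := (".*OoXx.", 3)

def Spec_parse_field_line (line : String) (row_index : Int) (out : (List (Int × Int)) × (List (Int × Int)) × (List (Int × Int))) : Prop := out = parse_field_line_alt line row_index
instance (line : String) (row_index : Int) (out : (List (Int × Int)) × (List (Int × Int)) × (List (Int × Int))) : Decidable (Spec_parse_field_line line row_index out) := by unfold Spec_parse_field_line; infer_instance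

-- ===== CLAIM (what is proved, stated in full; the proofs are below) =====
def Claim_equal_parse_field_line : Prop := ∀ (line : String) (row_index : Int), Dom_parse_field_line line row_index → Pre_parse_field_line line row_index → Spec_parse_field_line line row_index (parse_field_line line row_index)

-- ===== LEMMAS AND PROOFS =====

theorem pvLoopA_eq (r : Int) (cs : List Char) :
    ∀ (i : Int) (tok p1 p2 : List (Int × Int)),
    cs.all (fun c => c ∈ ['.', '*', 'O', 'o', 'X', 'x']) = true →
    pvLoopA r cs i tok p1 p2 =
      (tok ++ (PySem.List.enumerate cs i).filterMap (fun p => if p.2 = '*' then some (r, p.1) else none),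
       p1 ++ (PySem.List.enumerate cs i).filterMap (fun p => if p.2 ∈ "Oo".toList then some (r, p.1) else none),
       p2 ++ (PySem.List.enumerate cs i).filterMap (fun p => if p.2 ∈ "Xx".toList then some (r, p.1) else none)) := by
  induction cs with
  | nil => intro i tok p1 p2 _; simp [pvLoopA, PySem.List.enumerate]
  | cons c rest ih =>
    intro i tok p1 p2 hall
    simp only [List.all_cons, Bool.and_eq_true] at hall
    obtain ⟨hc, hrest⟩ := hall
    have hmem : c = '.' ∨ c = '*' ∨ c = 'O' ∨ c = 'o' ∨ c = 'X' ∨ c = 'x' := by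
      simpa using hc
    rcases hmem with h | h | h | h | h | h <;>
      subst h <;>
      simp [pvLoopA, PySem.List.enumerate_cons, ih _ _ _ _ hrest]

-- ===== VERDICT (by name: the statement is the Claim_ definition above) =====
theorem parse_field_line_spec : Claim_equal_parse_field_line := by
  intro line row_index _hdom hpre
  unfold Spec_parse_field_line parse_field_line parse_field_line_alt
  unfold Pre_parse_field_line at hpre
  have hval : line.toList.any (fun c => ¬ (c ∈ ".*OoXx".toList)) = false := by
    rw [Bool.eq_false_iff]
    intro h
    rw [List.any_eq_true] at h
    obtain ⟨c, hcm, hc⟩ := h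
    rw [List.all_eq_true] at hpre
    have h2 := hpre c hcm
    have hl : ".*OoXx".toList = ['.', '*', 'O', 'o', 'X', 'x'] := by decide
    simp only [hl, decide_eq_true_eq] at hc h2
    exact hc h2
  simp only [hval, if_neg, Bool.false_eq_true, not_false_iff]
  rw [pvLoopA_eq row_index line.toList 0 [] [] [] hpre]
  simp
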